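-- pv_equiv track=rewrite | github.com/HoshiMeisa/LanQiao-Cup-2023 | 省赛解答/H.py | min_edge_removal
-- ===== SOURCE A (Python) =====
-- import heapq
-- from collections import defaultdict
--
-- def dijkstra(graph, start):
--     distances = {start: 0}
--     visited = set()
--     pq = [(0, start)]
--
--     while pq:
--         cur_distance, cur_node = heapq.heappop(pq)
--         if cur_node in visited:
--             continue
--         visited.add(cur_node)
--
--         for neighbor, weight in graph[cur_node]:
--             distance = cur_distance + weight
--             if neighbor not in distances or distance < distances[neighbor]:
--                 distances[neighbor] = distance
--                 heapq.heappush(pq, (distance, neighbor))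
--
--     return distances
--
-- def min_edge_removal(n, edges):
--     graph = defaultdict(list)
--     for u, v, c in edges:
--         graph[u].append((v, c))
--         graph[v].append((u, c))
--
--     distances = dijkstra(graph, 1)
--
--     results = []
--     for i in range(1, n + 1):
--         if i not in distances:
--             results.append(-1)
--             continue
--
--         count = 0
--         for v, c in graph[i]:
--             if distances[v] + c == distances[i]:
--                 count += 1
--         results.append(count - 1)
--
--     return results
-- ===== SOURCE B (Python) =====
-- def min_edge_removal(n, edges):
--     adj = {}
--     for u, v, c in edges:
--         adj.setdefault(u, []).append((v, c))
--         adj.setdefault(v, []).append((u, c))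
--
--     dist = {1: 0}
--     visited = set()
--     while True:
--         best = None
--         for node, d in dist.items():
--             if node not in visited and (best is None or (d, node) < best):
--                 best = (d, node)
--         if best is None:
--             break
--         d, u = best
--         visited.add(u)
--         for v, c in adj.get(u, []):
--             nd = d + c
--             if v not in dist or nd < dist[v]:
--                 dist[v] = nd
--
--     cnt = {node: 0 for node in dist}
--     for u, v, c in edges:
--         du = dist.get(u)
--         dv = dist.get(v)
--         if du is not None and dv is not None:
--             if dv + c == du:
--                 cnt[u] += 1
--             if du + c == dv:
--                 cnt[v] += 1
--
--     return [cnt[i] - 1 if i in dist else -1 for i in range(1, n + 1)]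
-- ===== Notes on version B (the rewrite author's own statement) =====
-- stated objective: alternative
-- what changed: Replaces the heapq-based lazy-deletion Dijkstra by a selection-based Dijkstra (scan dist for the unvisited node with least (d, node) each round) and replaces the per-node adjacency re-scan that counts tight edges by a single pass over the edge list crediting both endpoints.
import Mathlib
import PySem

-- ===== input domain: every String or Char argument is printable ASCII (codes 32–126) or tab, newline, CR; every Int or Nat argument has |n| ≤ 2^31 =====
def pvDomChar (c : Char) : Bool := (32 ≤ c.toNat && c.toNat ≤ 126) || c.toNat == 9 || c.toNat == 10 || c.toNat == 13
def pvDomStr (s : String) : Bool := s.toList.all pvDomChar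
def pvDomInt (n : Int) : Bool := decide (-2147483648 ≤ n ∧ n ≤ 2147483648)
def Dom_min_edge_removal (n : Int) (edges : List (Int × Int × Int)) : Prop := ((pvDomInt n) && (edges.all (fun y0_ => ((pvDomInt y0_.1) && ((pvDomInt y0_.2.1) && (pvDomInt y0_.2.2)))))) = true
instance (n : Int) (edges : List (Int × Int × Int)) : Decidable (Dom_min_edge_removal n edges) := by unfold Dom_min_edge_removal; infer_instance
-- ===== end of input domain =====

-- B replaces A's heapq-based lazy Dijkstra by a selection-based Dijkstra and the per-node
-- adjacency re-scan by a single pass over the edge list (objective: alternative, not faster).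

-- Python tuple '<' on (Int, Int)
def pvLexLt (a b : Int × Int) : Bool := a.1 < b.1 || (a.1 == b.1 && a.2 < b.2)

-- ===== PORT A =====
-- graph[u].append((v, c)) on a defaultdict(list).  (defaultdict also materialises a key with an
-- empty list on the bare reads graph[cur_node] / graph[i]; that never changes any adjacency list
-- that is read, so lookups below via getD [] are exact.)
def pvGraphA (edges : List (Int × Int × Int)) : PySem.Dict Int (List (Int × Int)) :=
  edges.foldl (fun g e =>
    let g1 := g.insert e.1 (g.getD e.1 [] ++ [(e.2.1, e.2.2)])
    g1.insert e.2.1 (g1.getD e.2.1 [] ++ [(e.1, e.2.2)])) PySem.Dict.empty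

-- heapq.heappop: removes and returns the least (distance, node) pair (Python tuple order);
-- ported by that contract, with the heap represented as the plain list of its entries.
def pvPopMin (pq : List (Int × Int)) : Option ((Int × Int) × List (Int × Int)) :=
  match pq with
  | [] => none
  | x :: rest =>
      let m := rest.foldl (fun acc y => if pvLexLt y acc then y else acc) x
      some (m, pq.erase m)

-- loop body of 'for neighbor, weight in graph[cur_node]': relax and heappush (heap = entry list)
def pvStepA (d : Int) (s : PySem.Dict Int Int × List (Int × Int)) (vc : Int × Int) :
    PySem.Dict Int Int × List (Int × Int) :=
  let nd := d + vc.2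
  match s.1.get? vc.1 with
  | none => (s.1.insert vc.1 nd, (nd, vc.1) :: s.2)
  | some dv => if nd < dv then (s.1.insert vc.1 nd, (nd, vc.1) :: s.2) else s

def pvRelaxA (d : Int) (s : PySem.Dict Int Int × List (Int × Int)) (ns : List (Int × Int)) :
    PySem.Dict Int Int × List (Int × Int) :=
  ns.foldl (pvStepA d) s

-- termination measure for the while-pq loop
def pvW (g : PySem.Dict Int (List (Int × Int))) (visited : PySem.Set Int) : Nat :=
  ((g.keys.filter (fun w => !PySem.Set.contains visited w)).map
    (fun w => 1 + (g.getD w []).length)).sum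

theorem pvStepA_len (d : Int) (s : PySem.Dict Int Int × List (Int × Int)) (vc : Int × Int) :
    (pvStepA d s vc).2.length ≤ s.2.length + 1 := by
  unfold pvStepA
  rcases s.1.get? vc.1 with _ | dv <;> simp
  split <;> simp

theorem pvRelaxA_len (d : Int) (ns : List (Int × Int)) :
    ∀ s : PySem.Dict Int Int × List (Int × Int),
      (pvRelaxA d s ns).2.length ≤ s.2.length + ns.length := by
  induction ns with
  | nil => intro s; simp [pvRelaxA]
  | cons vc tl ih =>
    intro s
    have h1 : pvRelaxA d s (vc :: tl) = pvRelaxA d (pvStepA d s vc) tl := rfl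
    have h2 := ih (pvStepA d s vc)
    have h3 := pvStepA_len d s vc
    rw [h1]
    simp only [List.length_cons]
    omega

theorem pvLexLt_trans {a b c : Int × Int} (h1 : pvLexLt a b = true) (h2 : pvLexLt b c = true) :
    pvLexLt a c = true := by
  obtain ⟨a1, a2⟩ := a; obtain ⟨b1, b2⟩ := b; obtain ⟨c1, c2⟩ := c
  simp only [pvLexLt, Bool.or_eq_true, Bool.and_eq_true, decide_eq_true_eq, beq_iff_eq] at *
  omega

theorem pvLexLt_false_trans {a b c : Int × Int} (h1 : pvLexLt a b = false) (h2 : pvLexLt b c = false) :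
    pvLexLt a c = false := by
  obtain ⟨a1, a2⟩ := a; obtain ⟨b1, b2⟩ := b; obtain ⟨c1, c2⟩ := c
  simp only [pvLexLt, Bool.or_eq_false_iff, Bool.and_eq_false_iff, decide_eq_false_iff_not,
    beq_eq_false_iff_ne, Bool.or_eq_false_iff] at *
  omega

theorem pvFoldMin_mem (x : Int × Int) (rest : List (Int × Int)) :
    rest.foldl (fun acc y => if pvLexLt y acc then y else acc) x ∈ x :: rest := by
  induction rest generalizing x with
  | nil => simp
  | cons y tl ih =>
    simp only [List.foldl_cons]
    split
    · have := ih y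
      simp only [List.mem_cons] at this ⊢; tauto
    · have := ih x
      simp only [List.mem_cons] at this ⊢; tauto

theorem pvFoldMin_min (x : Int × Int) (rest : List (Int × Int)) :
    ∀ y ∈ x :: rest, pvLexLt y (rest.foldl (fun acc y => if pvLexLt y acc then y else acc) x) = false := by
  induction rest generalizing x with
  | nil =>
    intro y hy
    simp only [List.mem_singleton] at hy; subst hy
    simp only [List.foldl_nil]
    obtain ⟨a1, a2⟩ := y
    simp [pvLexLt]
  | cons z tl ih =>
    intro y hy
    simp only [List.foldl_cons]
    by_cases hzx : pvLexLt z x = true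
    · rw [if_pos hzx]
      have hhead := ih z z List.mem_cons_self
      rcases List.mem_cons.1 hy with rfl | hy'
      · by_contra h
        rw [Bool.not_eq_false] at h
        have := pvLexLt_trans hzx h
        rw [hhead] at this
        exact Bool.false_ne_true this
      · exact ih z y hy'
    · rw [if_neg hzx]
      have hhead := ih x x List.mem_cons_self
      rcases List.mem_cons.1 hy with rfl | hy'
      · exact hhead
      · rcases List.mem_cons.1 hy' with rfl | hy''
        · exact pvLexLt_false_trans (Bool.eq_false_iff.2 hzx) hhead
        · exact ih x y (List.mem_cons.2 (Or.inr hy''))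

theorem pvPopMin_some {pq pq' : List (Int × Int)} {m : Int × Int}
    (h : pvPopMin pq = some (m, pq')) :
    m ∈ pq ∧ pq' = pq.erase m ∧ ∀ y ∈ pq, pvLexLt y m = false := by
  match pq with
  | [] => simp [pvPopMin] at h
  | x :: rest =>
    simp only [pvPopMin, Option.some.injEq, Prod.mk.injEq] at h
    obtain ⟨h1, h2⟩ := h
    subst h1; subst h2
    exact ⟨pvFoldMin_mem x rest, rfl, pvFoldMin_min x rest⟩

theorem pv_sum_filter_le (f : Int → Nat) (p q : Int → Bool)
    (h : ∀ w, q w = true → p w = true) :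
    ∀ ks : List Int, ((ks.filter q).map f).sum ≤ ((ks.filter p).map f).sum := by
  intro ks
  induction ks with
  | nil => simp
  | cons k tl ih =>
    by_cases hq : q k = true
    · rw [List.filter_cons_of_pos hq, List.filter_cons_of_pos (h k hq)]
      simp only [List.map_cons, List.sum_cons]
      omega
    · rw [List.filter_cons_of_neg (by simpa using hq)]
      by_cases hp : p k = true
      · rw [List.filter_cons_of_pos hp]
        simp only [List.map_cons, List.sum_cons]
        omega
      · rw [List.filter_cons_of_neg (by simpa using hp)]
        exact ih

theorem pv_sum_filter_drop (f : Int → Nat) (p q : Int → Bool) (u : Int)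
    (hq : ∀ w, q w = (p w && !(w == u))) :
    ∀ ks : List Int, u ∈ ks → p u = true →
      ((ks.filter q).map f).sum + f u ≤ ((ks.filter p).map f).sum := by
  have himp : ∀ w, q w = true → p w = true := by
    intro w hw; rw [hq w, Bool.and_eq_true] at hw; exact hw.1
  intro ks
  induction ks with
  | nil => simp
  | cons k tl ih =>
    intro hu hp
    by_cases hk : k = u
    · subst hk
      have hqk : q k = false := by rw [hq k]; simp
      rw [List.filter_cons_of_neg (by simp [hqk]), List.filter_cons_of_pos hp]
      simp only [List.map_cons, List.sum_cons]
      have := pv_sum_filter_le f p q himp tl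
      omega
    · have hu' : u ∈ tl := by rcases List.mem_cons.1 hu with h | h; exact absurd h.symm hk; exact h
      by_cases hpk : p k = true
      · have hqk : q k = true := by rw [hq k]; simp [hpk, hk]
        rw [List.filter_cons_of_pos hqk, List.filter_cons_of_pos hpk]
        simp only [List.map_cons, List.sum_cons]
        have := ih hu' hp
        omega
      · have hqk : q k = false := by rw [hq k]; simp [Bool.eq_false_iff.2 hpk]
        rw [List.filter_cons_of_neg (by simp [hqk]), List.filter_cons_of_neg (by simpa using hpk)]
        exact ih hu' hp

theorem pv_contains_add (visited : PySem.Set Int) (u w : Int) :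
    PySem.Set.contains (PySem.Set.add visited u) w = (PySem.Set.contains visited w || w == u) := by
  rw [Bool.eq_iff_iff]
  simp only [Bool.or_eq_true, beq_iff_eq, PySem.Set.contains_iff, PySem.Set.mem_add]

theorem pvW_add_le (g : PySem.Dict Int (List (Int × Int))) (visited : PySem.Set Int) (u : Int) :
    pvW g (PySem.Set.add visited u) ≤ pvW g visited := by
  apply pv_sum_filter_le
  intro w hw
  simp only [Bool.not_eq_true'] at hw ⊢
  rw [pv_contains_add] at hw
  exact (Bool.or_eq_false_iff.1 hw).1

theorem pvW_drop (g : PySem.Dict Int (List (Int × Int))) (visited : PySem.Set Int) (u : Int)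
    (hk : u ∈ g.keys) (hv : PySem.Set.contains visited u = false) :
    pvW g (PySem.Set.add visited u) + 1 + (g.getD u []).length ≤ pvW g visited := by
  have h := pv_sum_filter_drop (fun w => 1 + (g.getD w []).length)
    (fun w => !PySem.Set.contains visited w) (fun w => !PySem.Set.contains (PySem.Set.add visited u) w) u
    (by
      intro w
      show (!PySem.Set.contains (PySem.Set.add visited u) w) = _
      rw [pv_contains_add, Bool.not_or])
    g.keys hk (by show (!PySem.Set.contains visited u) = true; rw [hv]; rfl)
  simp only at h
  unfold pvW
  omega

-- the while-pq loop of dijkstra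
def pvLoopA (g : PySem.Dict Int (List (Int × Int))) (pq : List (Int × Int))
    (dist : PySem.Dict Int Int) (visited : PySem.Set Int) : PySem.Dict Int Int :=
  match hpop : pvPopMin pq with
  | none => dist
  | some ((d, u), pq') =>
    if PySem.Set.contains visited u then pvLoopA g pq' dist visited
    else
      let s := pvRelaxA d (dist, pq') (g.getD u [])
      pvLoopA g s.2 s.1 (PySem.Set.add visited u)
termination_by pq.length + pvW g visited
decreasing_by
  · obtain ⟨hm, he, -⟩ := pvPopMin_some hpop
    have := List.length_erase_of_mem hm
    have h2 : pq'.length + 1 = pq.length := by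
      rw [he, this]; exact Nat.succ_pred_eq_of_pos (List.length_pos_of_mem hm)
    omega
  · obtain ⟨hm, he, -⟩ := pvPopMin_some hpop
    have hlen : pq'.length + 1 = pq.length := by
      rw [he, List.length_erase_of_mem hm]
      exact Nat.succ_pred_eq_of_pos (List.length_pos_of_mem hm)
    have hrel := pvRelaxA_len d (g.getD u []) (dist, pq')
    simp only at hrel
    rename_i hvis
    simp only [Bool.not_eq_true] at hvis
    by_cases hk : u ∈ g.keys
    · have := pvW_drop g visited u hk hvis
      omega
    · have hge : g.getD u [] = [] := by
        apply PySem.Dict.getD_of_not_contains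
        rw [← Bool.not_eq_true, PySem.Dict.contains_iff_mem_keys]; exact hk
      have := pvW_add_le g visited u
      rw [hge] at hrel ⊢
      simp only [List.length_nil, Nat.add_zero] at hrel
      omega

-- ===== PORT B =====
-- adj.setdefault(u, []).append((v, c))  (setdefault-then-append = modify with default [])
def pvGraphB (edges : List (Int × Int × Int)) : PySem.Dict Int (List (Int × Int)) :=
  edges.foldl (fun g e =>
    let g1 := g.modify e.1 [] (· ++ [(e.2.1, e.2.2)])
    g1.modify e.2.1 [] (· ++ [(e.1, e.2.2)])) PySem.Dict.empty

-- the 'for node, d in dist.items()' scan for the unvisited node with least (d, node)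
def pvBest (dist : PySem.Dict Int Int) (visited : PySem.Set Int) : Option (Int × Int) :=
  dist.items.foldl (fun best kv =>
    if !PySem.Set.contains visited kv.1 &&
        (match best with | none => true | some b => pvLexLt (kv.2, kv.1) b)
    then some (kv.2, kv.1) else best) none

-- the relaxation loop of B (distances only, no queue)
def pvStepB (d : Int) (dd : PySem.Dict Int Int) (vc : Int × Int) : PySem.Dict Int Int :=
  let nd := d + vc.2
  match dd.get? vc.1 with
  | none => dd.insert vc.1 nd
  | some dv => if nd < dv then dd.insert vc.1 nd else dd

def pvRelaxB (d : Int) (dist : PySem.Dict Int Int) (ns : List (Int × Int)) : PySem.Dict Int Int :=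
  ns.foldl (pvStepB d) dist

-- the body of the best-candidate scan, named for the proofs
def pvBestStep (visited : PySem.Set Int) (best : Option (Int × Int)) (kv : Int × Int) :
    Option (Int × Int) :=
  if !PySem.Set.contains visited kv.1 &&
      (match best with | none => true | some b => pvLexLt (kv.2, kv.1) b)
  then some (kv.2, kv.1) else best

def pvBestCond (visited : PySem.Set Int) (kv : Int × Int) (acc : Option (Int × Int)) : Bool :=
  !PySem.Set.contains visited kv.1 &&
    (match acc with | none => true | some b => pvLexLt (kv.2, kv.1) b)

theorem pvBestStep_eq (visited : PySem.Set Int) (acc : Option (Int × Int)) (kv : Int × Int) :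
    pvBestStep visited acc kv = if pvBestCond visited kv acc then some (kv.2, kv.1) else acc := rfl

theorem pvBestFold_inv (visited : PySem.Set Int) (l : List (Int × Int)) :
    ∀ acc : Option (Int × Int),
      (∀ b, l.foldl (pvBestStep visited) acc = some b →
        acc = some b ∨ ((b.2, b.1) ∈ l ∧ PySem.Set.contains visited b.2 = false)) ∧
      (l.foldl (pvBestStep visited) acc = none →
        acc = none ∧ ∀ kv ∈ l, PySem.Set.contains visited kv.1 = true) ∧
      ((∀ kv ∈ l, PySem.Set.contains visited kv.1 = true) →
        l.foldl (pvBestStep visited) acc = acc) ∧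
      (∀ b a, l.foldl (pvBestStep visited) acc = some b → acc = some a → pvLexLt a b = false) ∧
      (∀ b, l.foldl (pvBestStep visited) acc = some b →
        ∀ kv ∈ l, PySem.Set.contains visited kv.1 = false → pvLexLt (kv.2, kv.1) b = false) := by
  induction l with
  | nil =>
    intro acc
    refine ⟨by simp, by simp, by simp, ?_, by simp⟩
    intro b a h1 h2
    simp only [List.foldl_nil] at h1
    rw [h1] at h2
    rcases Option.some.inj h2 with rfl
    obtain ⟨b1, b2⟩ := b
    simp [pvLexLt]
  | cons kv tl ih =>
    intro acc
    have hfold : ∀ a' : Option (Int × Int), (kv :: tl).foldl (pvBestStep visited) a'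
        = tl.foldl (pvBestStep visited) (pvBestStep visited a' kv) := fun _ => rfl
    obtain ⟨ih1, ih2, ih3, ih4, ih5⟩ := ih (pvBestStep visited acc kv)
    by_cases hcond : pvBestCond visited kv acc = true
    case pos =>
      have hstep : pvBestStep visited acc kv = some (kv.2, kv.1) := by
        rw [pvBestStep_eq, if_pos hcond]
      have hvk : PySem.Set.contains visited kv.1 = false := by
        unfold pvBestCond at hcond
        rw [Bool.and_eq_true, Bool.not_eq_true'] at hcond; exact hcond.1
      refine ⟨?_, ?_, ?_, ?_, ?_⟩
      · intro b hb
        rw [hfold] at hb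
        rcases ih1 b hb with h | h
        · rw [hstep] at h
          rcases Option.some.inj h with rfl
          exact Or.inr ⟨by simp, hvk⟩
        · exact Or.inr ⟨List.mem_cons.2 (Or.inr h.1), h.2⟩
      · intro hb
        rw [hfold] at hb
        obtain ⟨h1, -⟩ := ih2 hb
        rw [hstep] at h1; cases h1
      · intro hall
        exact absurd (hall kv List.mem_cons_self) (by intro hx; rw [hvk] at hx; exact Bool.false_ne_true hx)
      · intro b a hb ha
        rw [hfold] at hb
        subst ha
        have hlt : pvLexLt (kv.2, kv.1) a = true := by
          unfold pvBestCond at hcond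
          rw [Bool.and_eq_true] at hcond; exact hcond.2
        have h2 := ih4 b (kv.2, kv.1) hb hstep
        by_contra hab
        rw [Bool.not_eq_false] at hab
        have := pvLexLt_trans hlt hab
        rw [h2] at this
        exact Bool.false_ne_true this
      · intro b hb kv' hkv' hvis'
        rw [hfold] at hb
        rcases List.mem_cons.1 hkv' with rfl | h
        · exact ih4 b (kv'.2, kv'.1) hb hstep
        · exact ih5 b hb kv' h hvis'
    case neg =>
      have hstep : pvBestStep visited acc kv = acc := by
        rw [pvBestStep_eq, if_neg hcond]
      refine ⟨?_, ?_, ?_, ?_, ?_⟩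
      · intro b hb
        rw [hfold] at hb
        rcases ih1 b hb with h | h
        · rw [hstep] at h; exact Or.inl h
        · exact Or.inr ⟨List.mem_cons.2 (Or.inr h.1), h.2⟩
      · intro hb
        rw [hfold] at hb
        obtain ⟨h1, h2⟩ := ih2 hb
        rw [hstep] at h1
        refine ⟨h1, ?_⟩
        intro kv' hkv'
        rcases List.mem_cons.1 hkv' with rfl | h
        · subst h1
          unfold pvBestCond at hcond
          simpa using hcond
        · exact h2 kv' h
      · intro hall
        rw [hfold]
        exact (ih3 (fun kv' h => hall kv' (List.mem_cons.2 (Or.inr h)))).trans hstep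
      · intro b a hb ha
        rw [hfold] at hb
        exact ih4 b a hb (hstep.trans ha)
      · intro b hb kv' hkv' hvis'
        rw [hfold] at hb
        rcases List.mem_cons.1 hkv' with rfl | h
        · rcases ha : acc with _ | a
          · rw [ha] at hcond; unfold pvBestCond at hcond
            rw [Bool.and_eq_true, Bool.not_eq_true'] at hcond
            push_neg at hcond
            exact absurd rfl (hcond hvis')
          · have hlt : pvLexLt (kv'.2, kv'.1) a = false := by
              rw [ha] at hcond
              unfold pvBestCond at hcond
              simp only [Bool.and_eq_true, Bool.not_eq_true'] at hcond
              by_contra hx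
              rw [Bool.not_eq_false] at hx
              exact hcond ⟨hvis', hx⟩
            exact pvLexLt_false_trans hlt (ih4 b a hb (hstep.trans ha))
        · exact ih5 b hb kv' h hvis'

theorem pvBest_eq_foldl (dist : PySem.Dict Int Int) (visited : PySem.Set Int) :
    pvBest dist visited = dist.items.foldl (pvBestStep visited) none := rfl

theorem pvBest_some_mem {dist : PySem.Dict Int Int} {visited : PySem.Set Int} {d u : Int}
    (h : pvBest dist visited = some (d, u)) :
    u ∈ dist.keys ∧ PySem.Set.contains visited u = false := by
  rw [pvBest_eq_foldl] at h
  obtain ⟨inv1, -, -, -, -⟩ := pvBestFold_inv visited dist.items none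
  rcases inv1 _ h with h1 | h1
  · exact absurd h1 (by simp)
  · exact ⟨PySem.Dict.mem_keys_of_mem_items _ h1.1, h1.2⟩

theorem pvStepB_keys {d : Int} {dd : PySem.Dict Int Int} {vc : Int × Int} :
    ∀ w ∈ (pvStepB d dd vc).keys, w = vc.1 ∨ w ∈ dd.keys := by
  intro w hw
  unfold pvStepB at hw
  rcases hg : dd.get? vc.1 with _ | dv <;> rw [hg] at hw
  · exact (PySem.Dict.mem_keys_insert _ _ _ _).1 hw
  · simp only at hw
    split at hw
    · exact (PySem.Dict.mem_keys_insert _ _ _ _).1 hw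
    · exact Or.inr hw

theorem pvRelaxB_keys_subset (d : Int) (ns : List (Int × Int)) :
    ∀ dist : PySem.Dict Int Int, ∀ w ∈ (pvRelaxB d dist ns).keys, w ∈ dist.keys ∨ w ∈ ns.map Prod.fst := by
  induction ns with
  | nil => intro dist w hw; exact Or.inl hw
  | cons vc tl ih =>
    intro dist w hw
    have h1 : pvRelaxB d dist (vc :: tl) = pvRelaxB d (pvStepB d dist vc) tl := rfl
    rw [h1] at hw
    rcases ih (pvStepB d dist vc) w hw with h | h
    · rcases pvStepB_keys w h with h2 | h2
      · exact Or.inr (by simp [h2])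
      · exact Or.inl h2
    · exact Or.inr (by simp only [List.map_cons, List.mem_cons]; exact Or.inr h)

-- termination measure universe for the selection loop
def pvUniv (g : PySem.Dict Int (List (Int × Int))) (dist : PySem.Dict Int Int) : Finset Int :=
  g.keys.toFinset ∪ (g.values.flatMap (fun ns => ns.map Prod.fst)).toFinset ∪ dist.keys.toFinset

theorem pvUniv_relax_subset (g : PySem.Dict Int (List (Int × Int))) (dist : PySem.Dict Int Int)
    (d u : Int) : pvUniv g (pvRelaxB d dist (g.getD u [])) ⊆ pvUniv g dist := by
  intro w hw
  simp only [pvUniv, Finset.mem_union, List.mem_toFinset] at hw ⊢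
  rcases hw with (h | h) | h
  · exact Or.inl (Or.inl h)
  · exact Or.inl (Or.inr h)
  · rcases pvRelaxB_keys_subset d (g.getD u []) dist w h with h2 | h2
    · exact Or.inr h2
    · by_cases hc : g.contains u = true
      · left; right
        rw [List.mem_flatMap]
        refine ⟨g.getD u [], ?_, h2⟩
        rw [PySem.Dict.contains_eq_isSome_get?, Option.isSome_iff_exists] at hc
        obtain ⟨v, hv⟩ := hc
        rw [PySem.Dict.getD_of_get?_eq_some _ _ hv]
        have := PySem.Dict.mem_items_of_get?_eq_some _ hv
        simp only [PySem.Dict.values]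
        exact List.mem_map.2 ⟨(u, v), this, rfl⟩
      · rw [PySem.Dict.getD_of_not_contains _ _ (by simpa using hc)] at h2
        simp at h2

-- the while-True selection loop of B
def pvLoopB (g : PySem.Dict Int (List (Int × Int))) (dist : PySem.Dict Int Int)
    (visited : PySem.Set Int) : PySem.Dict Int Int :=
  match hb : pvBest dist visited with
  | none => dist
  | some (d, u) =>
      pvLoopB g (pvRelaxB d dist (g.getD u [])) (PySem.Set.add visited u)
termination_by ((pvUniv g dist).filter (fun w => ¬ PySem.Set.contains visited w = true)).card
decreasing_by
  obtain ⟨hk, hv⟩ := pvBest_some_mem hb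
  have hnotmem : u ∉ visited := fun hmem => by
    rw [← PySem.Set.contains_iff] at hmem; rw [hv] at hmem; exact Bool.false_ne_true hmem
  apply Finset.card_lt_card
  constructor
  · intro w hw
    simp only [Finset.mem_filter] at hw ⊢
    obtain ⟨hw1, hw2⟩ := hw
    refine ⟨pvUniv_relax_subset g dist d u hw1, ?_⟩
    intro hc; apply hw2
    rw [PySem.Set.contains_iff] at hc ⊢
    exact (PySem.Set.mem_add visited u w).2 (Or.inl hc)
  · intro hsub
    have hu : u ∈ (pvUniv g dist).filter (fun w => ¬ PySem.Set.contains visited w = true) := by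
      simp only [Finset.mem_filter]
      refine ⟨?_, fun hc => hnotmem ((PySem.Set.contains_iff _ _).1 hc)⟩
      simp only [pvUniv, Finset.mem_union]
      right; simpa using hk
    have := hsub hu
    simp only [Finset.mem_filter] at this
    exact this.2 ((PySem.Set.contains_iff _ _).2 ((PySem.Set.mem_add visited u u).2 (Or.inr rfl)))

-- full port of A
def min_edge_removal (n : Int) (edges : List (Int × Int × Int)) : List Int :=
  let g := pvGraphA edges
  let dist := pvLoopA g [(0, 1)] (PySem.Dict.empty.insert 1 0) PySem.Set.empty
  (PySem.List.pyRange 1 (n + 1) 1).foldl (fun results i =>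
    match dist.get? i with
    | none => results ++ [-1]
    | some di =>
        -- distances[v]: v is always a key here (every neighbour of a reachable node was
        -- relaxed), so getD _ 0 is exact
        let count := (g.getD i []).foldl (fun cnt vc =>
          if dist.getD vc.1 0 + vc.2 = di then cnt + 1 else cnt) (0 : Int)
        results ++ [count - 1]) []

-- full port of B
def min_edge_removal_alt (n : Int) (edges : List (Int × Int × Int)) : List Int :=
  let g := pvGraphB edges
  let dist := pvLoopB g (PySem.Dict.empty.insert 1 0) PySem.Set.empty
  let cnt0 := dist.keys.foldl (fun c k => c.insert k 0) (PySem.Dict.empty : PySem.Dict Int Int)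
  let cnt := edges.foldl (fun c e =>
    match dist.get? e.1, dist.get? e.2.1 with
    | some du, some dv =>
        -- cnt[u] += 1 on a key that is always present (u, v ∈ dist = cnt's keys): modify _ 0 is exact
        let c1 := if dv + e.2.2 = du then c.modify e.1 0 (· + 1) else c
        if du + e.2.2 = dv then c1.modify e.2.1 0 (· + 1) else c1
    | _, _ => c) cnt0
  (PySem.List.pyRange 1 (n + 1) 1).map
    (fun i => if dist.contains i then cnt.getD i 0 - 1 else -1)

-- ===== PRECONDITION & SPEC =====
def Spec_min_edge_removal (n : Int) (edges : List (Int × Int × Int)) (out : List Int) : Prop := out = min_edge_removal_alt n edges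
instance (n : Int) (edges : List (Int × Int × Int)) (out : List Int) : Decidable (Spec_min_edge_removal n edges out) := by unfold Spec_min_edge_removal; infer_instance

-- ===== CLAIM (what is proved, stated in full; the proofs are below) =====
def Claim_equal_min_edge_removal : Prop := ∀ (n : Int) (edges : List (Int × Int × Int)), Dom_min_edge_removal n edges → Spec_min_edge_removal n edges (min_edge_removal n edges)

-- ===== LEMMAS AND PROOFS =====

theorem pvLexLt_antisymm {a b : Int × Int} (h1 : pvLexLt a b = false) (h2 : pvLexLt b a = false) :
    a = b := by
  obtain ⟨a1, a2⟩ := a; obtain ⟨b1, b2⟩ := b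
  simp only [pvLexLt, Bool.or_eq_false_iff, Bool.and_eq_false_iff, decide_eq_false_iff_not,
    beq_eq_false_iff_ne] at *
  simp only [Prod.mk.injEq]
  omega

theorem pvPopMin_none {pq : List (Int × Int)} (h : pvPopMin pq = none) : pq = [] := by
  match pq with
  | [] => rfl
  | x :: rest => simp [pvPopMin] at h


-- --- relaxation: A's dist component is B's relaxation ---

theorem pvStepAB (d : Int) (s : PySem.Dict Int Int × List (Int × Int)) (vc : Int × Int) :
    (pvStepA d s vc).1 = pvStepB d s.1 vc := by
  unfold pvStepA pvStepB
  rcases hg : s.1.get? vc.1 with _ | dv <;> simp only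
  split <;> rfl

theorem pvRelaxAB (d : Int) (ns : List (Int × Int)) :
    ∀ s : PySem.Dict Int Int × List (Int × Int),
      (pvRelaxA d s ns).1 = pvRelaxB d s.1 ns := by
  induction ns with
  | nil => intro s; rfl
  | cons vc tl ih =>
    intro s
    have h1 : pvRelaxA d s (vc :: tl) = pvRelaxA d (pvStepA d s vc) tl := rfl
    have h2 : pvRelaxB d s.1 (vc :: tl) = pvRelaxB d (pvStepB d s.1 vc) tl := rfl
    rw [h1, h2, ih (pvStepA d s vc), pvStepAB]

-- --- the heap/dist invariant is preserved by one relaxation step ---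

theorem pvStepA_inv (vis' : PySem.Set Int) (d : Int) (vc : Int × Int)
    (dist : PySem.Dict Int Int) (pq : List (Int × Int))
    (hP : ∀ d' w, (d', w) ∈ pq → ∃ dw, dist.get? w = some dw ∧ dw ≤ d')
    (hQ : ∀ w dw, dist.get? w = some dw → PySem.Set.contains vis' w = false → (dw, w) ∈ pq)
    (hN : dist.keys.Nodup) :
    (∀ d' w, (d', w) ∈ (pvStepA d (dist, pq) vc).2 →
        ∃ dw, (pvStepA d (dist, pq) vc).1.get? w = some dw ∧ dw ≤ d') ∧
    (∀ w dw, (pvStepA d (dist, pq) vc).1.get? w = some dw →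
        PySem.Set.contains vis' w = false → (dw, w) ∈ (pvStepA d (dist, pq) vc).2) ∧
    (pvStepA d (dist, pq) vc).1.keys.Nodup := by
  unfold pvStepA
  rcases hg : dist.get? vc.1 with _ | dv <;> simp only
  · refine ⟨?_, ?_, PySem.Dict.nodup_keys_insert _ _ _ hN⟩
    · intro d' w hmem
      rcases List.mem_cons.1 hmem with heq | hmem'
      · rcases Prod.mk.injEq .. ▸ heq with ⟨h1, h2⟩
        subst h1; subst h2
        exact ⟨d + vc.2, PySem.Dict.get?_insert_self _ _ _, le_refl _⟩
      · obtain ⟨dw, hdw, hle⟩ := hP d' w hmem'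
        have hne : w ≠ vc.1 := by
          intro hEq; subst hEq; rw [hg] at hdw; cases hdw
        exact ⟨dw, by rw [PySem.Dict.get?_insert_of_ne _ _ hne]; exact hdw, hle⟩
    · intro w dw hget hvis
      by_cases hw : w = vc.1
      · subst hw
        rw [PySem.Dict.get?_insert_self] at hget
        rcases Option.some.inj hget with rfl
        exact List.mem_cons_self
      · rw [PySem.Dict.get?_insert_of_ne _ _ hw] at hget
        exact List.mem_cons.2 (Or.inr (hQ w dw hget hvis))
  · split
    case isTrue hlt =>
      refine ⟨?_, ?_, PySem.Dict.nodup_keys_insert _ _ _ hN⟩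
      · intro d' w hmem
        rcases List.mem_cons.1 hmem with heq | hmem'
        · rcases Prod.mk.injEq .. ▸ heq with ⟨h1, h2⟩
          subst h1; subst h2
          exact ⟨d + vc.2, PySem.Dict.get?_insert_self _ _ _, le_refl _⟩
        · obtain ⟨dw, hdw, hle⟩ := hP d' w hmem'
          by_cases hne : w = vc.1
          · subst hne
            rw [hg] at hdw
            rcases Option.some.inj hdw with rfl
            exact ⟨d + vc.2, PySem.Dict.get?_insert_self _ _ _, by omega⟩
          · exact ⟨dw, by rw [PySem.Dict.get?_insert_of_ne _ _ hne]; exact hdw, hle⟩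
      · intro w dw hget hvis
        by_cases hw : w = vc.1
        · subst hw
          rw [PySem.Dict.get?_insert_self] at hget
          rcases Option.some.inj hget with rfl
          exact List.mem_cons_self
        · rw [PySem.Dict.get?_insert_of_ne _ _ hw] at hget
          exact List.mem_cons.2 (Or.inr (hQ w dw hget hvis))
    case isFalse hlt =>
      exact ⟨hP, hQ, hN⟩

theorem pvRelax_inv (vis' : PySem.Set Int) (d : Int) (ns : List (Int × Int)) :
    ∀ (dist : PySem.Dict Int Int) (pq : List (Int × Int)),
      (∀ d' w, (d', w) ∈ pq → ∃ dw, dist.get? w = some dw ∧ dw ≤ d') →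
      (∀ w dw, dist.get? w = some dw → PySem.Set.contains vis' w = false → (dw, w) ∈ pq) →
      dist.keys.Nodup →
      (∀ d' w, (d', w) ∈ (pvRelaxA d (dist, pq) ns).2 →
          ∃ dw, (pvRelaxA d (dist, pq) ns).1.get? w = some dw ∧ dw ≤ d') ∧
      (∀ w dw, (pvRelaxA d (dist, pq) ns).1.get? w = some dw →
          PySem.Set.contains vis' w = false → (dw, w) ∈ (pvRelaxA d (dist, pq) ns).2) ∧
      (pvRelaxA d (dist, pq) ns).1.keys.Nodup := by
  induction ns with
  | nil => intro dist pq hP hQ hN; exact ⟨hP, hQ, hN⟩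
  | cons vc tl ih =>
    intro dist pq hP hQ hN
    obtain ⟨hP', hQ', hN'⟩ := pvStepA_inv vis' d vc dist pq hP hQ hN
    have h1 : pvRelaxA d (dist, pq) (vc :: tl)
        = pvRelaxA d ((pvStepA d (dist, pq) vc).1, (pvStepA d (dist, pq) vc).2) tl := rfl
    rw [h1]
    exact ih (pvStepA d (dist, pq) vc).1 (pvStepA d (dist, pq) vc).2 hP' hQ' hN'

-- --- unfolding equations for the two loops ---

theorem pvLoopB_eq_none {g : PySem.Dict Int (List (Int × Int))} {dist : PySem.Dict Int Int}
    {visited : PySem.Set Int} (h : pvBest dist visited = none) :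
    pvLoopB g dist visited = dist := by
  rw [pvLoopB.eq_def]
  split
  · rfl
  · rename_i heq; rw [h] at heq; cases heq

theorem pvLoopB_eq_some {g : PySem.Dict Int (List (Int × Int))} {dist : PySem.Dict Int Int}
    {visited : PySem.Set Int} {d u : Int} (h : pvBest dist visited = some (d, u)) :
    pvLoopB g dist visited = pvLoopB g (pvRelaxB d dist (g.getD u [])) (PySem.Set.add visited u) := by
  rw [pvLoopB.eq_def]
  split
  · rename_i heq; rw [h] at heq; cases heq
  · rename_i d' u' heq
    rw [h] at heq
    rcases Option.some.inj heq with heq2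
    rcases Prod.mk.injEq .. ▸ heq2 with ⟨rfl, rfl⟩
    rfl

-- --- the main simulation: A's heap loop computes B's selection loop ---

theorem pvLoop_eq (g : PySem.Dict Int (List (Int × Int))) :
    ∀ (pq : List (Int × Int)) (dist : PySem.Dict Int Int) (visited : PySem.Set Int),
      (∀ d' w, (d', w) ∈ pq → ∃ dw, dist.get? w = some dw ∧ dw ≤ d') →
      (∀ w dw, dist.get? w = some dw → PySem.Set.contains visited w = false → (dw, w) ∈ pq) →
      dist.keys.Nodup →
      pvLoopA g pq dist visited = pvLoopB g dist visited := by
  intro pq dist visited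
  induction pq, dist, visited using pvLoopA.induct g with
  | case1 pq dist visited hpop =>
    intro hP hQ hN
    have hnil := pvPopMin_none hpop
    subst hnil
    rw [pvLoopA]
    refine (pvLoopB_eq_none ?_).symm
    rw [pvBest_eq_foldl]
    obtain ⟨-, -, inv3, -, -⟩ := pvBestFold_inv visited dist.items none
    apply inv3
    intro kv hkv
    by_contra hx
    rw [Bool.not_eq_true] at hx
    have hget := PySem.Dict.get?_of_mem_items _ (by exact hkv) hN
    have := hQ kv.1 kv.2 hget hx
    cases this
  | case2 pq dist visited d u pq' hpop hvis ih =>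
    intro hP hQ hN
    obtain ⟨hm, he, hmin⟩ := pvPopMin_some hpop
    rw [pvLoopA, hpop]
    simp only [hvis, if_true]
    apply ih
    · intro d' w hmem
      exact hP d' w (he ▸ hmem |> List.mem_of_mem_erase)
    · intro w dw hget hvw
      have hne : (dw, w) ≠ (d, u) := by
        intro hEq
        rcases Prod.mk.injEq .. ▸ hEq with ⟨-, h2⟩
        subst h2
        rw [hvw] at hvis; cases hvis
      rw [he]
      exact (List.mem_erase_of_ne hne).2 (hQ w dw hget hvw)
    · exact hN
  | case3 pq dist visited d u pq' hpop hvis s ih =>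
    intro hP hQ hN
    obtain ⟨hm, he, hmin⟩ := pvPopMin_some hpop
    rw [Bool.not_eq_true] at hvis
    -- dist.get? u = some d
    obtain ⟨du, hdu, hle⟩ := hP d u hm
    have hd : du = d := by
      have h1 := hmin (du, u) (hQ u du hdu hvis)
      simp only [pvLexLt, Bool.or_eq_false_iff, Bool.and_eq_false_iff,
        decide_eq_false_iff_not, beq_eq_false_iff_ne] at h1
      omega
    subst hd
    -- pvBest dist visited = some (du, u)
    have hbest : pvBest dist visited = some (du, u) := by
      rw [pvBest_eq_foldl]
      obtain ⟨inv1, inv2, -, -, inv5⟩ := pvBestFold_inv visited dist.items none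
      rcases hr : dist.items.foldl (pvBestStep visited) none with _ | b
      · obtain ⟨-, hall⟩ := inv2 hr
        have := hall (u, du) (PySem.Dict.mem_items_of_get?_eq_some _ hdu)
        rw [hvis] at this; cases this
      · rcases inv1 b hr with h | h
        · cases h
        · have hgetb := PySem.Dict.get?_of_mem_items _ h.1 hN
          have hmemb : (b.1, b.2) ∈ pq := hQ b.2 b.1 hgetb h.2
          have h1 : pvLexLt (b.1, b.2) (du, u) = false := hmin (b.1, b.2) hmemb
          have h2 : pvLexLt (du, u) b = false :=
            inv5 b hr (u, du) (PySem.Dict.mem_items_of_get?_eq_some _ hdu) hvis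
          have h3 : (du, u) = (b.1, b.2) := pvLexLt_antisymm h2 (by simpa using h1)
          rw [h3]
    -- rewrite both sides one step
    rw [pvLoopA, hpop]
    simp only [hvis, Bool.false_eq_true, if_false]
    rw [pvLoopB_eq_some hbest]
    -- invariants for the recursive call
    have hPe : ∀ d' w, (d', w) ∈ pq' → ∃ dw, dist.get? w = some dw ∧ dw ≤ d' := by
      intro d' w hmem
      exact hP d' w (he ▸ hmem |> List.mem_of_mem_erase)
    have hQe : ∀ w dw, dist.get? w = some dw →
        PySem.Set.contains (PySem.Set.add visited u) w = false → (dw, w) ∈ pq' := by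
      intro w dw hget hvw
      rw [pv_contains_add, Bool.or_eq_false_iff, beq_eq_false_iff_ne] at hvw
      have hne : (dw, w) ≠ (du, u) := by
        intro hEq
        rcases Prod.mk.injEq .. ▸ hEq with ⟨-, h2⟩
        exact hvw.2 h2
      rw [he]
      exact (List.mem_erase_of_ne hne).2 (hQ w dw hget hvw.1)
    obtain ⟨hP2, hQ2, hN2⟩ :=
      pvRelax_inv (PySem.Set.add visited u) du (g.getD u []) dist pq' hPe hQe hN
    have := ih hP2 hQ2 hN2
    rw [this, pvRelaxAB]

-- --- postconditions of the selection loop: unique keys and neighbour closure ---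

theorem pvStepB_contains_mono (d : Int) (dd : PySem.Dict Int Int) (vc : Int × Int) (w : Int)
    (h : dd.contains w = true) : (pvStepB d dd vc).contains w = true := by
  unfold pvStepB
  rcases hg : dd.get? vc.1 with _ | dv <;> simp only
  · rw [PySem.Dict.contains_insert, h]; simp
  · split
    · rw [PySem.Dict.contains_insert, h]; simp
    · exact h

theorem pvRelaxB_contains_mono (d : Int) (ns : List (Int × Int)) :
    ∀ dist w, dist.contains w = true → (pvRelaxB d dist ns).contains w = true := by
  induction ns with
  | nil => intro dist w h; exact h
  | cons vc tl ih =>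
    intro dist w h
    exact ih (pvStepB d dist vc) w (pvStepB_contains_mono d dist vc w h)

theorem pvStepB_contains_self (d : Int) (dd : PySem.Dict Int Int) (vc : Int × Int) :
    (pvStepB d dd vc).contains vc.1 = true := by
  unfold pvStepB
  rcases hg : dd.get? vc.1 with _ | dv <;> simp only
  · exact PySem.Dict.contains_insert_self _ _ _
  · split
    · exact PySem.Dict.contains_insert_self _ _ _
    · rw [PySem.Dict.contains_eq_isSome_get?, hg]; rfl

theorem pvRelaxB_contains_targets (d : Int) (ns : List (Int × Int)) :
    ∀ dist, ∀ vc ∈ ns, (pvRelaxB d dist ns).contains vc.1 = true := by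
  induction ns with
  | nil => intro dist vc h; cases h
  | cons vc0 tl ih =>
    intro dist vc h
    rcases List.mem_cons.1 h with rfl | h'
    · exact pvRelaxB_contains_mono d tl (pvStepB d dist vc) vc.1 (pvStepB_contains_self d dist vc)
    · exact ih (pvStepB d dist vc0) vc h'

theorem pvLoopB_closure (g : PySem.Dict Int (List (Int × Int))) :
    ∀ (dist : PySem.Dict Int Int) (visited : PySem.Set Int),
      (∀ u, PySem.Set.contains visited u = true → ∀ vc ∈ g.getD u [], dist.contains vc.1 = true) →
      ∀ u du, (pvLoopB g dist visited).get? u = some du →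
        ∀ vc ∈ g.getD u [], (pvLoopB g dist visited).contains vc.1 = true := by
  intro dist visited
  induction dist, visited using pvLoopB.induct g with
  | case1 dist visited hb =>
    intro hinv u du hget vc hvc
    rw [pvLoopB_eq_none hb] at hget ⊢
    rw [pvBest_eq_foldl] at hb
    obtain ⟨-, inv2, -, -, -⟩ := pvBestFold_inv visited dist.items none
    obtain ⟨-, hall⟩ := inv2 hb
    have hu := hall (u, du) (PySem.Dict.mem_items_of_get?_eq_some _ hget)
    exact hinv u hu vc hvc
  | case2 dist visited d u hb ih =>
    intro hinv u' du' hget vc hvc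
    rw [pvLoopB_eq_some hb] at hget ⊢
    refine ih ?_ u' du' hget vc hvc
    intro w hw vc' hvc'
    rw [pv_contains_add, Bool.or_eq_true] at hw
    rcases hw with hw' | hw'
    · exact pvRelaxB_contains_mono d (g.getD u []) dist vc'.1 (hinv w hw' vc' hvc')
    · have hwu : w = u := by simpa using hw'
      subst hwu
      exact pvRelaxB_contains_targets d (g.getD w []) dist vc' hvc'

-- --- the counting phase: A's adjacency re-scan equals B's single edge pass ---

def pvAdjList (edges : List (Int × Int × Int)) (i : Int) : List (Int × Int) :=
  edges.flatMap (fun e =>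
    (if i = e.1 then [(e.2.1, e.2.2)] else []) ++ (if i = e.2.1 then [(e.1, e.2.2)] else []))

theorem pvGraphA_adj_gen (i : Int) :
    ∀ (edges : List (Int × Int × Int)) (g0 : PySem.Dict Int (List (Int × Int))),
      (edges.foldl (fun g e =>
        let g1 := g.insert e.1 (g.getD e.1 [] ++ [(e.2.1, e.2.2)])
        g1.insert e.2.1 (g1.getD e.2.1 [] ++ [(e.1, e.2.2)])) g0).getD i []
      = g0.getD i [] ++ pvAdjList edges i := by
  intro edges
  induction edges with
  | nil => intro g0; simp [pvAdjList]
  | cons e tl ih =>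
    intro g0
    rw [List.foldl_cons, ih]
    have hstep : (let g1 := g0.insert e.1 (g0.getD e.1 [] ++ [(e.2.1, e.2.2)])
        g1.insert e.2.1 (g1.getD e.2.1 [] ++ [(e.1, e.2.2)])).getD i []
        = g0.getD i [] ++
          ((if i = e.1 then [(e.2.1, e.2.2)] else []) ++ (if i = e.2.1 then [(e.1, e.2.2)] else [])) := by
      simp only [PySem.Dict.getD_insert]
      have h4 : (e.1 = e.2.1) ↔ (e.2.1 = e.1) := eq_comm
      by_cases h1 : i = e.2.1 <;> by_cases h2 : i = e.1 <;> by_cases h3 : e.2.1 = e.1 <;>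
        first
        | (exfalso; omega)
        | simp [h1, h2, h3, h4, List.append_assoc]
    have hadj : pvAdjList (e :: tl) i
        = ((if i = e.1 then [(e.2.1, e.2.2)] else []) ++ (if i = e.2.1 then [(e.1, e.2.2)] else []))
          ++ pvAdjList tl i := by
      unfold pvAdjList; rw [List.flatMap_cons]
    rw [hstep, hadj, List.append_assoc]

theorem pvGraphA_adj (edges : List (Int × Int × Int)) (i : Int) :
    (pvGraphA edges).getD i [] = pvAdjList edges i := by
  have h := pvGraphA_adj_gen i edges PySem.Dict.empty
  have h0 : (PySem.Dict.empty : PySem.Dict Int (List (Int × Int))).getD i [] = [] :=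
    PySem.Dict.getD_empty _ _
  rw [pvGraphA, h, h0, List.nil_append]

theorem pv_count_sum (F : PySem.Dict Int Int) (di : Int) :
    ∀ (l : List (Int × Int)) (acc : Int),
      l.foldl (fun cnt vc => if F.getD vc.1 0 + vc.2 = di then cnt + 1 else cnt) acc
      = acc + (l.map (fun vc => if F.getD vc.1 0 + vc.2 = di then (1 : Int) else 0)).sum := by
  intro l
  induction l with
  | nil => intro acc; simp
  | cons vc tl ih =>
    intro acc
    rw [List.foldl_cons, ih]
    simp only [List.map_cons, List.sum_cons]
    split <;> ring

theorem pv_sum_map_flatMap (f : Int × Int × Int → List (Int × Int)) (h : Int × Int → Int) :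
    ∀ l : List (Int × Int × Int),
      ((l.flatMap f).map h).sum = (l.map (fun a => ((f a).map h).sum)).sum := by
  intro l
  induction l with
  | nil => simp
  | cons a tl ih => simp [List.flatMap_cons, ih]

-- B's per-edge counting step and contribution
def pvCntStep (F : PySem.Dict Int Int) (c : PySem.Dict Int Int) (e : Int × Int × Int) :
    PySem.Dict Int Int :=
  match F.get? e.1, F.get? e.2.1 with
  | some du, some dv =>
      let c1 := if dv + e.2.2 = du then c.modify e.1 0 (· + 1) else c
      if du + e.2.2 = dv then c1.modify e.2.1 0 (· + 1) else c1
  | _, _ => c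

def pvBContrib (F : PySem.Dict Int Int) (i : Int) (e : Int × Int × Int) : Int :=
  match F.get? e.1, F.get? e.2.1 with
  | some du, some dv =>
      (if i = e.1 ∧ dv + e.2.2 = du then 1 else 0) + (if i = e.2.1 ∧ du + e.2.2 = dv then 1 else 0)
  | _, _ => 0

theorem pvCntStep_getD (F : PySem.Dict Int Int) (i : Int) (c : PySem.Dict Int Int)
    (e : Int × Int × Int) : (pvCntStep F c e).getD i 0 = c.getD i 0 + pvBContrib F i e := by
  unfold pvCntStep pvBContrib
  rcases hu : F.get? e.1 with _ | du <;> rcases hv : F.get? e.2.1 with _ | dv <;> simp only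
  · omega
  · omega
  · omega
  · by_cases h1 : dv + e.2.2 = du <;> by_cases h2 : du + e.2.2 = dv <;>
      by_cases hi1 : i = e.1 <;> by_cases hi2 : i = e.2.1 <;>
      by_cases he : e.2.1 = e.1 <;>
      simp [h1, h2, hi1, hi2, he, PySem.Dict.getD_modify] <;> omega

theorem pvCnt_fold (F : PySem.Dict Int Int) (i : Int) :
    ∀ (edges : List (Int × Int × Int)) (c0 : PySem.Dict Int Int),
      (edges.foldl (pvCntStep F) c0).getD i 0 = c0.getD i 0 + (edges.map (pvBContrib F i)).sum := by
  intro edges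
  induction edges with
  | nil => intro c0; simp
  | cons e tl ih =>
    intro c0
    rw [List.foldl_cons, ih, pvCntStep_getD]
    simp [add_assoc]

theorem pvCnt0_getD (i : Int) :
    ∀ (ks : List Int) (c0 : PySem.Dict Int Int), (∀ j, c0.getD j 0 = 0) →
      (ks.foldl (fun c k => c.insert k 0) c0).getD i 0 = 0 := by
  intro ks
  induction ks with
  | nil => intro c0 h; exact h i
  | cons k tl ih =>
    intro c0 h
    rw [List.foldl_cons]
    apply ih
    intro j
    rw [PySem.Dict.getD_insert]
    split
    · rfl
    · exact h j

theorem pv_edge_contrib (edges : List (Int × Int × Int)) (F : PySem.Dict Int Int) (i di : Int)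
    (hdi : F.get? i = some di)
    (hclos : ∀ u du, F.get? u = some du → ∀ vc ∈ (pvGraphA edges).getD u [], F.contains vc.1 = true) :
    ∀ e ∈ edges,
      (((if i = e.1 then [(e.2.1, e.2.2)] else []) ++ (if i = e.2.1 then [(e.1, e.2.2)] else [])).map
        (fun vc => if F.getD vc.1 0 + vc.2 = di then (1 : Int) else 0)).sum = pvBContrib F i e := by
  intro e he
  unfold pvBContrib
  rcases hu : F.get? e.1 with _ | du <;> rcases hv : F.get? e.2.1 with _ | dv <;> simp only
  · -- both endpoints unreachable
    have h1 : i ≠ e.1 := fun h => by rw [← h, hdi] at hu; cases hu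
    have h2 : i ≠ e.2.1 := fun h => by rw [← h, hdi] at hv; cases hv
    simp [h1, h2]
  · -- e.1 unreachable: i can be neither endpoint
    have h1 : i ≠ e.1 := fun h => by rw [← h, hdi] at hu; cases hu
    have h2 : i ≠ e.2.1 := by
      intro h
      have hmem : (e.1, e.2.2) ∈ (pvGraphA edges).getD i [] := by
        rw [pvGraphA_adj]
        exact List.mem_flatMap.2 ⟨e, he, by simp [h, h1]⟩
      have hc := hclos i di hdi _ hmem
      rw [PySem.Dict.contains_eq_isSome_get?] at hc
      rw [hu] at hc
      cases hc
    simp [h1, h2]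
  · -- e.2.1 unreachable: i can be neither endpoint
    have h2 : i ≠ e.2.1 := fun h => by rw [← h, hdi] at hv; cases hv
    have h1 : i ≠ e.1 := by
      intro h
      have hmem : (e.2.1, e.2.2) ∈ (pvGraphA edges).getD i [] := by
        rw [pvGraphA_adj]
        exact List.mem_flatMap.2 ⟨e, he, by simp [h, h2]⟩
      have hc := hclos i di hdi _ hmem
      rw [PySem.Dict.contains_eq_isSome_get?] at hc
      rw [hv] at hc
      cases hc
    simp [h1, h2]
  · -- both reachable
    have hgu : F.getD e.1 0 = du := PySem.Dict.getD_of_get?_eq_some _ _ hu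
    have hgv : F.getD e.2.1 0 = dv := PySem.Dict.getD_of_get?_eq_some _ _ hv
    by_cases h1 : i = e.1 <;> by_cases h2 : i = e.2.1
    · have hdu : du = di := by rw [← h1, hdi] at hu; exact (Option.some.inj hu).symm
      have hdv : dv = di := by rw [← h2, hdi] at hv; exact (Option.some.inj hv).symm
      by_cases h3 : e.1 = e.2.1 <;>
        simp [h1, h2, h3, hgu, hgv, hdu, hdv] <;> (try split_ifs) <;> (try simp) <;> (try omega)
    · have hdu : du = di := by rw [← h1, hdi] at hu; exact (Option.some.inj hu).symm
      by_cases h3 : e.1 = e.2.1 <;>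
        simp [h1, h2, h3, hgu, hgv, hdu] <;> (try split_ifs) <;> (try simp) <;> (try omega)
    · have hdv : dv = di := by rw [← h2, hdi] at hv; exact (Option.some.inj hv).symm
      by_cases h3 : e.1 = e.2.1 <;>
        simp [h1, h2, h3, hgu, hgv, hdv] <;> (try split_ifs) <;> (try simp) <;> (try omega)
    · simp [h1, h2]

theorem pv_results_eq (F : PySem.Dict Int Int) (g : PySem.Dict Int (List (Int × Int)))
    (cnt : PySem.Dict Int Int)
    (hpoint : ∀ i : Int, (match F.get? i with
        | none => (-1 : Int)
        | some di => (g.getD i []).foldl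
            (fun cnt' vc => if F.getD vc.1 0 + vc.2 = di then cnt' + 1 else cnt') 0 - 1)
      = (if F.contains i then cnt.getD i 0 - 1 else -1)) :
    ∀ (l : List Int) (acc : List Int),
      l.foldl (fun results i =>
        match F.get? i with
        | none => results ++ [-1]
        | some di => results ++ [(g.getD i []).foldl
            (fun cnt' vc => if F.getD vc.1 0 + vc.2 = di then cnt' + 1 else cnt') 0 - 1]) acc
      = acc ++ l.map (fun i => if F.contains i then cnt.getD i 0 - 1 else -1) := by
  intro l
  induction l with
  | nil => intro acc; simp
  | cons i tl ih =>
    intro acc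
    rw [List.foldl_cons]
    have hstep : (match F.get? i with
        | none => acc ++ [(-1 : Int)]
        | some di => acc ++ [(g.getD i []).foldl
            (fun cnt' vc => if F.getD vc.1 0 + vc.2 = di then cnt' + 1 else cnt') 0 - 1])
        = acc ++ [if F.contains i then cnt.getD i 0 - 1 else -1] := by
      rw [← hpoint i]
      rcases F.get? i with _ | di <;> rfl
    rw [hstep, ih, List.map_cons, List.append_assoc, List.singleton_append]

theorem pv_main (n : Int) (edges : List (Int × Int × Int)) :
    min_edge_removal n edges = min_edge_removal_alt n edges := by
  have hd0 : (PySem.Dict.empty.insert 1 0 : PySem.Dict Int Int).keys.Nodup :=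
    PySem.Dict.nodup_keys_insert _ _ _ PySem.Dict.nodup_keys_empty
  have hdist : pvLoopA (pvGraphA edges) [(0, 1)] (PySem.Dict.empty.insert 1 0) PySem.Set.empty
      = pvLoopB (pvGraphA edges) (PySem.Dict.empty.insert 1 0) PySem.Set.empty := by
    apply pvLoop_eq
    · intro d' w hmem
      rw [List.mem_singleton] at hmem
      rcases Prod.mk.injEq .. ▸ hmem with ⟨rfl, rfl⟩
      exact ⟨0, PySem.Dict.get?_insert_self _ _ _, le_refl 0⟩
    · intro w dw hget hvis
      by_cases hw : w = 1
      · subst hw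
        rw [PySem.Dict.get?_insert_self] at hget
        rcases Option.some.inj hget with rfl
        exact List.mem_singleton.2 rfl
      · rw [PySem.Dict.get?_insert_of_ne _ _ hw, PySem.Dict.get?_empty] at hget
        cases hget
    · exact hd0
  set F := pvLoopB (pvGraphA edges) (PySem.Dict.empty.insert 1 0) PySem.Set.empty with hFdef
  have hclos : ∀ u du, F.get? u = some du →
      ∀ vc ∈ (pvGraphA edges).getD u [], F.contains vc.1 = true := by
    intro u du hget vc hvc
    refine pvLoopB_closure (pvGraphA edges) _ _ ?_ u du hget vc hvc
    intro w hw
    exfalso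
    have hmem := (PySem.Set.contains_iff _ _).1 hw
    cases hmem
  have hpoint : ∀ i : Int, (match F.get? i with
      | none => (-1 : Int)
      | some di => ((pvGraphA edges).getD i []).foldl
          (fun cnt' vc => if F.getD vc.1 0 + vc.2 = di then cnt' + 1 else cnt') 0 - 1)
      = (if F.contains i
          then (edges.foldl (pvCntStep F)
            (F.keys.foldl (fun c k => c.insert k 0) PySem.Dict.empty)).getD i 0 - 1
          else -1) := by
    intro i
    rcases hgi : F.get? i with _ | di
    · have hc : F.contains i = false := by
        rw [PySem.Dict.contains_eq_isSome_get?, hgi]; rfl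
      rw [hc]
      simp
    · have hcont : F.contains i = true := by
        rw [PySem.Dict.contains_eq_isSome_get?, hgi]; rfl
      rw [hcont]
      simp only [if_true]
      congr 1
      rw [pvCnt_fold, pvCnt0_getD i F.keys PySem.Dict.empty
        (fun j => PySem.Dict.getD_empty _ _), zero_add]
      rw [pvGraphA_adj, pv_count_sum, zero_add]
      rw [pvAdjList, pv_sum_map_flatMap]
      exact congrArg List.sum (List.map_congr_left (pv_edge_contrib edges F i di hgi hclos))
  have hA : min_edge_removal n edges
      = (PySem.List.pyRange 1 (n + 1) 1).foldl (fun results i =>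
          match (pvLoopA (pvGraphA edges) [(0, 1)] (PySem.Dict.empty.insert 1 0) PySem.Set.empty).get? i with
          | none => results ++ [-1]
          | some di => results ++ [((pvGraphA edges).getD i []).foldl
              (fun cnt' vc => if (pvLoopA (pvGraphA edges) [(0, 1)] (PySem.Dict.empty.insert 1 0) PySem.Set.empty).getD vc.1 0 + vc.2 = di then cnt' + 1 else cnt') 0 - 1]) [] := rfl
  have hB : min_edge_removal_alt n edges
      = (PySem.List.pyRange 1 (n + 1) 1).map (fun i =>
          if F.contains i
          then (edges.foldl (pvCntStep F)
            (F.keys.foldl (fun c k => c.insert k 0) PySem.Dict.empty)).getD i 0 - 1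
          else -1) := rfl
  rw [hA, hB, hdist]
  rw [pv_results_eq F (pvGraphA edges) _ hpoint (PySem.List.pyRange 1 (n + 1) 1) []]
  rw [List.nil_append]

-- ===== VERDICT (by name: the statement is the Claim_ definition above) =====
theorem min_edge_removal_spec : Claim_equal_min_edge_removal := by
  intro n edges _
  unfold Spec_min_edge_removal
  exact pv_main n edges
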